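-- pv_equiv track=rewrite | github.com/silviu26/Python | lab3/tema2.py | ex12
-- ===== SOURCE A (Python) =====
-- def ultimele2ch(e):
--     return e[len(e)-2:]
--
-- def ex12(lista):
--     rezultat=[]
--     lista =sorted( lista,key=ultimele2ch)
--     cuvPrecedent=lista[0]
--     t=[]
--     for i in range(len(lista)):
--         if lista[i][len(lista[i])-2:]==cuvPrecedent[len(cuvPrecedent)-2:]:
--             t.append(lista[i])
--         else:
--             cuvPrecedent=lista[i]
--             rezultat.append(t)
--             t=[]
--             t.append(lista[i])
--     rezultat.append(t)
--     return rezultat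
-- ===== SOURCE B (Python) =====
-- def ex12(lista):
--     groups = {}
--     for w in lista:
--         groups.setdefault(w[-2:], []).append(w)
--     return [groups[k] for k in sorted(groups)]
-- ===== Notes on version B (the rewrite author's own statement) =====
-- stated objective: idiomatic
-- what changed: Replaces sort-the-whole-list-then-scan-consecutive-runs with a one-pass dict grouping words by their last-two-character key, then emitting groups in sorted key order; only the k distinct keys are sorted instead of all n words (measured ~1.9x faster).
import Mathlib
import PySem

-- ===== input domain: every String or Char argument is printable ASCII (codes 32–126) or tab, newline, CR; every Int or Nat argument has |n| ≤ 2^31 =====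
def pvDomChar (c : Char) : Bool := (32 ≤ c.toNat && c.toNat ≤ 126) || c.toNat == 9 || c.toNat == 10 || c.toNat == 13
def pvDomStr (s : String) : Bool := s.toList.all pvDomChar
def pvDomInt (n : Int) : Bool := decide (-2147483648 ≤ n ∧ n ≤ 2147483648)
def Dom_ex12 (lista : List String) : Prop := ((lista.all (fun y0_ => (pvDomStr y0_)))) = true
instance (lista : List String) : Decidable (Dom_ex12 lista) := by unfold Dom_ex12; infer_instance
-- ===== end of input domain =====

-- B replaces A's sort-whole-list-then-scan-consecutive-runs grouping by a one-pass dict keyed on the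
-- last two characters, emitting the groups in sorted key order (same return value; idiomatic rewrite).

-- ===== PORT A =====
def ultimele2ch (e : String) : String :=
  PySem.Str.slice e (some (PySem.Str.len e - 2)) none

def ex12 (lista : List String) : List (List String) :=
  let s := PySem.List.sorted lista ultimele2ch
  match s with
  | [] => []   -- Python raises IndexError at lista[0] here; excluded by Pre_ex12
  | h :: _ =>
    let st := s.foldl (fun (acc : List (List String) × String × List String) w =>
      if PySem.Str.slice w (some (PySem.Str.len w - 2)) none ==
         PySem.Str.slice acc.2.1 (some (PySem.Str.len acc.2.1 - 2)) none
      then (acc.1, acc.2.1, acc.2.2 ++ [w])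
      else (acc.1 ++ [acc.2.2], w, ([w] : List String)))
      (([] : List (List String)), h, ([] : List String))
    st.1 ++ [st.2.2]

-- ===== PORT B =====
def ex12_alt (lista : List String) : List (List String) :=
  let d := lista.foldl
    (fun (d : PySem.Dict String (List String)) w =>
      d.modify (PySem.Str.slice w (some (-2)) none) [] (fun l => l ++ [w]))
    PySem.Dict.empty
  (PySem.List.sorted d.keys (fun k => k)).map (fun k => d.getD k [])

-- ===== PRECONDITION & SPEC =====
-- Pre_ excludes only the empty list, on which A raises IndexError (lista[0]).
def Pre_ex12 (lista : List String) : Prop := lista ≠ []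
instance (lista : List String) : Decidable (Pre_ex12 lista) := by unfold Pre_ex12; infer_instance
def pvWitness_ex12 : List String := ["ab", "x", "cab"]

def Spec_ex12 (lista : List String) (out : List (List String)) : Prop := out = ex12_alt lista
instance (lista : List String) (out : List (List String)) : Decidable (Spec_ex12 lista out) := by unfold Spec_ex12; infer_instance

-- ===== CLAIM (what is proved, stated in full; the proofs are below) =====
def Claim_equal_ex12 : Prop := ∀ (lista : List String), Dom_ex12 lista → Pre_ex12 lista → Spec_ex12 lista (ex12 lista)

-- ===== LEMMAS AND PROOFS =====

-- the common key: the last two characters (B's spelling of it)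
def key (w : String) : String := PySem.Str.slice w (some (-2)) none

-- A's spelling e[len(e)-2:] computes the same key as B's e[-2:]
theorem key_eq (e : String) :
    PySem.Str.slice e (some (PySem.Str.len e - 2)) none = key e := by
  unfold key
  simp only [PySem.Str.slice, PySem.Chars.slice, PySem.Str.len_eq]
  have h : PySem.List.clampIdx e.toList.length ((e.toList.length : Int) - 2)
      = PySem.List.clampIdx e.toList.length (-2) := by
    unfold PySem.List.clampIdx; split_ifs <;> omega
  rw [PySem.List.slice_some_none, PySem.List.slice_some_none, h]

theorem filter_takeWhile_self {α : Type} (p : α → Bool) (l : List α) :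
    (l.takeWhile p).filter p = l.takeWhile p :=
  List.filter_eq_self.mpr (fun _ ha => List.mem_takeWhile_imp ha)

theorem filter_eq_nil_of {α : Type} (p : α → Bool) (l : List α)
    (h : ∀ a ∈ l, p a = false) : l.filter p = [] :=
  List.filter_eq_nil_iff.mpr (by simpa using h)

-- grouping of a list into maximal runs of equal keys, and the list of run keys
def grp : List String → List (List String)
  | [] => []
  | x :: xs =>
    (x :: xs.takeWhile (fun y => key y == key x)) ::
      grp (xs.dropWhile (fun y => key y == key x))
termination_by l => l.length
decreasing_by
  have := List.length_dropWhile_le (fun y => key y == key x) xs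
  simp; omega

def grpKeys : List String → List String
  | [] => []
  | x :: xs => key x :: grpKeys (xs.dropWhile (fun y => key y == key x))
termination_by l => l.length
decreasing_by
  have := List.length_dropWhile_le (fun y => key y == key x) xs
  simp; omega

-- A's loop, with the result accumulator factored out
def G (prev : String) (t : List String) : List String → List (List String)
  | [] => [t]
  | w :: ws => if key w == key prev then G prev (t ++ [w]) ws else t :: G w [w] ws

theorem fold_eq_G (s : List String) : ∀ (rez : List (List String)) (prev : String) (t : List String),
    (let st := s.foldl (fun (acc : List (List String) × String × List String) w =>
      if key w == key acc.2.1
      then (acc.1, acc.2.1, acc.2.2 ++ [w])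
      else (acc.1 ++ [acc.2.2], w, ([w] : List String))) (rez, prev, t)
     st.1 ++ [st.2.2]) = rez ++ G prev t s := by
  induction s with
  | nil => intro rez prev t; simp [G]
  | cons w ws ih =>
    intro rez prev t
    simp only [List.foldl_cons, G]
    by_cases h : key w == key prev
    · simp only [h, if_true]
      exact ih rez prev (t ++ [w])
    · simp only [h, Bool.false_eq_true, if_false]
      rw [ih (rez ++ [t]) w [w]]
      simp

theorem G_eq_grp (s : List String) : ∀ (prev : String) (t : List String),
    G prev t s = (t ++ s.takeWhile (fun y => key y == key prev)) ::
      grp (s.dropWhile (fun y => key y == key prev)) := by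
  induction s with
  | nil => intro prev t; simp [G, grp]
  | cons w ws ih =>
    intro prev t
    by_cases h : key w == key prev
    · simp only [G, h, if_true, List.takeWhile_cons, List.dropWhile_cons, ih]
      simp [h]
    · simp only [G, h, Bool.false_eq_true, if_false, List.takeWhile_cons, List.dropWhile_cons]
      rw [ih w [w]]
      simp [grp, h]

theorem dropWhile_head_false {p : String → Bool} : ∀ (xs : List String) (d0 : String) (dt : List String),
    xs.dropWhile p = d0 :: dt → p d0 = false := by
  intro xs; induction xs with
  | nil => intro _ _ h; simp [List.dropWhile] at h
  | cons x xs ih =>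
    intro d0 dt h
    rw [List.dropWhile_cons] at h
    split at h
    · exact ih _ _ h
    · next hx => cases h; simpa using hx

-- in a key-sorted list, everything after the first run has strictly larger key
theorem key_lt_of_mem_dropWhile {x : String} {xs : List String}
    (hp : (x :: xs).Pairwise (fun a b => key a ≤ key b)) :
    ∀ y ∈ xs.dropWhile (fun y => key y == key x), key x < key y := by
  rcases hd : xs.dropWhile (fun y => key y == key x) with _ | ⟨d0, dt⟩
  · simp
  · have hsub : (d0 :: dt).Sublist xs := hd ▸ List.dropWhile_sublist _
    have hx0 : key x < key d0 := by
      have h1 : key x ≤ key d0 :=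
        (List.pairwise_cons.mp hp).1 d0 (hsub.mem (by simp))
      have h2 : key d0 ≠ key x := by
        simpa using dropWhile_head_false xs d0 dt hd
      exact lt_of_le_of_ne h1 (Ne.symm h2)
    intro y hy
    rcases List.mem_cons.mp hy with rfl | hy'
    · exact hx0
    · have hpd : (d0 :: dt).Pairwise (fun a b => key a ≤ key b) :=
        ((List.pairwise_cons.mp hp).2).sublist hsub
      exact lt_of_lt_of_le hx0 ((List.pairwise_cons.mp hpd).1 y hy')

theorem grpKeys_mem : ∀ (s : List String) (k : String), k ∈ grpKeys s → ∃ y ∈ s, k = key y := by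
  intro s
  induction s using grpKeys.induct with
  | case1 => simp [grpKeys]
  | case2 x xs ih =>
    intro k hk
    rw [grpKeys] at hk
    rcases List.mem_cons.mp hk with rfl | hk'
    · exact ⟨x, by simp, rfl⟩
    · obtain ⟨y, hy, rfl⟩ := ih k hk'
      exact ⟨y, List.mem_cons_of_mem _ ((List.dropWhile_sublist _).mem hy), rfl⟩

theorem mem_grpKeys : ∀ (s : List String), s.Pairwise (fun a b => key a ≤ key b) →
    ∀ y ∈ s, key y ∈ grpKeys s := by
  intro s
  induction s using grpKeys.induct with
  | case1 => simp
  | case2 x xs ih =>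
    intro hp y hy
    rw [grpKeys]
    rcases List.mem_cons.mp hy with rfl | hy'
    · simp
    · by_cases hkey : key y == key x
      · have : key y = key x := by simpa using hkey
        simp [this]
      · have hsplit := List.takeWhile_append_dropWhile
          (p := fun y => key y == key x) (l := xs)
        have hy2 : y ∈ xs.takeWhile (fun y => key y == key x)
            ∨ y ∈ xs.dropWhile (fun y => key y == key x) := by
          rw [← List.mem_append, hsplit]; exact hy'
        rcases hy2 with h1 | h2
        · exact absurd (List.mem_takeWhile_imp h1) (by simpa using hkey)
        · exact List.mem_cons_of_mem _
            (ih (((List.pairwise_cons.mp hp).2).sublist (List.dropWhile_sublist _)) y h2)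

theorem grpKeys_pairwise : ∀ (s : List String), s.Pairwise (fun a b => key a ≤ key b) →
    (grpKeys s).Pairwise (· < ·) := by
  intro s
  induction s using grpKeys.induct with
  | case1 => intro _; simp [grpKeys]
  | case2 x xs ih =>
    intro hp
    rw [grpKeys, List.pairwise_cons]
    constructor
    · intro k hk
      obtain ⟨y, hy, rfl⟩ := grpKeys_mem _ k hk
      exact key_lt_of_mem_dropWhile hp y hy
    · exact ih (((List.pairwise_cons.mp hp).2).sublist (List.dropWhile_sublist _))

theorem grp_char : ∀ (s : List String), s.Pairwise (fun a b => key a ≤ key b) →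
    grp s = (grpKeys s).map (fun k => s.filter (fun w => key w == k)) := by
  intro s
  induction s using grpKeys.induct with
  | case1 => intro _; simp [grp, grpKeys]
  | case2 x xs ih =>
    intro hp
    have hptail : (List.dropWhile (fun y => key y == key x) xs).Pairwise
        (fun a b => key a ≤ key b) :=
      ((List.pairwise_cons.mp hp).2).sublist (List.dropWhile_sublist _)
    have hfilter_run : (x :: xs).filter (fun w => key w == key x)
        = x :: xs.takeWhile (fun y => key y == key x) := by
      rw [List.filter_cons]
      simp only [beq_self_eq_true, if_true]
      congr 1
      conv_lhs => rw [← List.takeWhile_append_dropWhile (p := fun y => key y == key x) (l := xs)]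
      rw [List.filter_append]
      have h2 : (xs.dropWhile (fun y => key y == key x)).filter (fun w => key w == key x)
          = [] := by
        apply filter_eq_nil_of
        intro a ha
        have := key_lt_of_mem_dropWhile hp a ha
        simp only [beq_eq_false_iff_ne]
        exact fun hcontra => absurd hcontra (ne_of_gt this)
      rw [filter_takeWhile_self, h2, List.append_nil]
    rw [grp, grpKeys, List.map_cons, ih hptail, hfilter_run]
    congr 1
    apply List.map_congr_left
    intro k hk
    obtain ⟨y, hy, rfl⟩ := grpKeys_mem _ k hk
    have hky : key x < key y := key_lt_of_mem_dropWhile hp y hy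
    -- s.filter (= key y) = dropWhile.filter (= key y): x and the takeWhile part have key = key x < key y
    have hxne : (key x == key y) = false := by
      simp only [beq_eq_false_iff_ne]; exact ne_of_lt hky
    have h3 : (xs.takeWhile (fun y => key y == key x)).filter (fun w => key w == key y)
        = [] := by
      apply filter_eq_nil_of
      intro a ha
      have : key a = key x := by simpa using List.mem_takeWhile_imp ha
      simp only [beq_eq_false_iff_ne, this]
      exact ne_of_lt hky
    conv_rhs => rw [List.filter_cons,
      ← List.takeWhile_append_dropWhile (p := fun y => key y == key x) (l := xs),
      List.filter_append, h3]
    simp [hxne]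

-- the outer list of B is exactly the list of run keys of the sorted list
theorem keys_char (lista : List String) :
    PySem.List.sorted (PySem.Set.ofList (lista.map key)) (fun k => k)
      = grpKeys (PySem.List.sorted lista key) := by
  apply PySem.List.sorted_eq_of_perm_of_pairwise_lt
  · rw [List.perm_ext_iff_of_nodup
      ((grpKeys_pairwise _ (PySem.List.sorted_pairwise lista key)).imp ne_of_lt)
      (PySem.Set.nodup_ofList _)]
    intro k
    rw [PySem.Set.mem_ofList]
    constructor
    · intro hk
      obtain ⟨y, hy, rfl⟩ := grpKeys_mem _ k hk
      exact List.mem_map_of_mem (((PySem.List.sorted_perm lista key false).mem_iff).mp hy)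
    · intro hk
      obtain ⟨y, hy, rfl⟩ := List.mem_map.mp hk
      exact mem_grpKeys _ (PySem.List.sorted_pairwise lista key) y
        (((PySem.List.sorted_perm lista key false).mem_iff).mpr hy)
  · exact grpKeys_pairwise _ (PySem.List.sorted_pairwise lista key)

-- stability of Python's insertion sort: filtering one key class commutes with one insertion
theorem filter_insertBy (x k : String) : ∀ (ys : List String),
    ys.Pairwise (fun a b => key a ≤ key b) →
    (PySem.List.insertBy (fun a b => decide (key a < key b)) x ys).filter (fun w => key w == k)
      = if key x = k then ys.filter (fun w => key w == k) ++ [x]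
        else ys.filter (fun w => key w == k) := by
  intro ys
  induction ys with
  | nil =>
    intro _
    simp only [PySem.List.insertBy, List.filter_nil]
    by_cases h : key x = k <;> simp [List.filter_cons, h]
  | cons y ys ih =>
    intro hp
    rw [PySem.List.insertBy]
    by_cases hlt : key x < key y
    · rw [if_pos (by simpa using hlt)]
      by_cases hxk : key x = k
      · have hnil : (y :: ys).filter (fun w => key w == k) = [] := by
          apply filter_eq_nil_of
          intro a ha
          have h1 : key y ≤ key a := by
            rcases List.mem_cons.mp ha with rfl | ha'
            · exact le_refl _
            · exact (List.pairwise_cons.mp hp).1 a ha'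
          have : k < key a := hxk ▸ lt_of_lt_of_le hlt h1
          simp only [beq_eq_false_iff_ne]
          exact fun hc => absurd hc (ne_of_gt this)
        rw [if_pos hxk, List.filter_cons, hnil]
        simp [hxk]
      · rw [if_neg hxk, List.filter_cons]
        simp [show (key x == k) = false by simpa using hxk]
    · rw [if_neg (by simpa using hlt)]
      have ihy := ih (List.pairwise_cons.mp hp).2
      rw [List.filter_cons, List.filter_cons, ihy]
      by_cases hxk : key x = k <;> by_cases hyk : (key y == k) = true <;>
        simp [hxk, hyk]

-- stability of Python's sort: filtering one key class commutes with sorting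
theorem filter_sorted (l : List String) (k : String) :
    (PySem.List.sorted l key).filter (fun w => key w == k)
      = l.filter (fun w => key w == k) := by
  induction l using List.reverseRecOn with
  | nil => simp [PySem.List.sorted_eq_foldl_insertBy]
  | append_singleton l x ih =>
    rw [PySem.List.sorted_eq_foldl_insertBy, List.foldl_append, List.foldl_cons,
      List.foldl_nil, ← PySem.List.sorted_eq_foldl_insertBy,
      filter_insertBy x k _ (PySem.List.sorted_pairwise l key), List.filter_append]
    by_cases hxk : key x = k
    · rw [if_pos hxk, ih]
      simp [List.filter_cons, hxk]
    · rw [if_neg hxk, ih]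
      simp [List.filter_cons, show (key x == k) = false by simpa using hxk]

theorem A_char (lista : List String) (h : lista ≠ []) :
    ex12 lista = grp (PySem.List.sorted lista key) := by
  unfold ex12
  rw [show ultimele2ch = key from funext key_eq]
  rcases hs : PySem.List.sorted lista key with _ | ⟨hd, rest⟩
  · exact absurd ((PySem.List.sorted_eq_nil_iff lista key false).mp hs) h
  · simp only [key_eq]
    rw [fold_eq_G, List.nil_append]
    rw [show G hd [] (hd :: rest) = G hd [hd] rest by simp [G]]
    rw [G_eq_grp, grp]
    simp

theorem B_char (lista : List String) :
    ex12_alt lista = (PySem.List.sorted (PySem.Set.ofList (lista.map key)) (fun k => k)).map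
      (fun k => lista.filter (fun w => key w == k)) := by
  unfold ex12_alt
  show (PySem.List.sorted (lista.foldl
      (fun (d : PySem.Dict String (List String)) w =>
        d.modify (key w) [] (fun l => l ++ [w])) PySem.Dict.empty).keys (fun k => k)).map
      (fun k => (lista.foldl
        (fun (d : PySem.Dict String (List String)) w =>
          d.modify (key w) [] (fun l => l ++ [w])) PySem.Dict.empty).getD k []) = _
  have hkeys : (lista.foldl
      (fun (d : PySem.Dict String (List String)) w =>
        d.modify (key w) [] (fun l => l ++ [w])) PySem.Dict.empty).keys
      = PySem.Set.ofList (lista.map key) := by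
    rw [PySem.Dict.keys_foldl_modify_key lista key [] (fun _ w => fun l => l ++ [w])]
    rw [PySem.Dict.keys_empty, PySem.Set.update_nil_left]
  rw [hkeys]
  apply List.map_congr_left
  intro k _
  have h2 : (lista.foldl
      (fun (d : PySem.Dict String (List String)) w =>
        d.modify (key w) [] (fun l => l ++ [w])) PySem.Dict.empty)
      = ((lista.map (fun w => (key w, w))).foldl
        (fun d p => d.modify p.1 [] (fun l => l ++ [p.2])) PySem.Dict.empty) :=
    (List.foldl_map (f := fun w => (key w, w))
      (g := fun d p => d.modify p.1 [] (fun l => l ++ [p.2]))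
      (l := lista) (init := PySem.Dict.empty)).symm
  rw [h2, PySem.Dict.getD_foldl_modify_append, PySem.Dict.getD_empty, List.nil_append,
    List.filter_map, List.map_map]
  have hp : ((fun (p : String × String) => p.1 == k) ∘ fun w => (key w, w))
      = (fun w => key w == k) := rfl
  rw [hp]
  have hq : ((fun (p : String × String) => p.2) ∘ fun w => (key w, w))
      = (fun w => w) := rfl
  rw [hq, List.map_id_fun']
  rfl

-- ===== VERDICT (by name: the statement is the Claim_ definition above) =====
theorem ex12_spec : Claim_equal_ex12 := by
  intro lista _ hpre
  unfold Spec_ex12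
  rw [A_char lista hpre, B_char lista,
    grp_char _ (PySem.List.sorted_pairwise lista key), ← keys_char]
  exact List.map_congr_left (fun k _ => filter_sorted lista k)
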